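-- pv_equiv track=rewrite | github.com/JaimePSantos/BolsaAveiro | Interval/GraphicalInterface/FileFrame.py | breakInput
-- ===== SOURCE A (Python) =====
-- def breakInput(input):
--     chars = ""
--     inputList = []
--     for char in input:
--         if(char=='\n'):
--             inputList.append(chars)
--             chars = ""
--             continue
--         else:
--             chars+= char
--     inputList = [input for input in inputList if input.strip()]
--     return inputList
-- ===== SOURCE B (Python) =====
-- def breakInput(input):
--     parts = input.split('\n')[:-1]
--     return [s for s in parts if s.strip()]
-- ===== Notes on version B (the rewrite author's own statement) =====
-- stated objective: simpler
-- what changed: The manual per-character accumulation loop is replaced by one str.split on the newline separator plus a [:-1] slice dropping the unterminated final segment, then the same non-blank filter; the C-level split also makes it measurably faster.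
import Mathlib
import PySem

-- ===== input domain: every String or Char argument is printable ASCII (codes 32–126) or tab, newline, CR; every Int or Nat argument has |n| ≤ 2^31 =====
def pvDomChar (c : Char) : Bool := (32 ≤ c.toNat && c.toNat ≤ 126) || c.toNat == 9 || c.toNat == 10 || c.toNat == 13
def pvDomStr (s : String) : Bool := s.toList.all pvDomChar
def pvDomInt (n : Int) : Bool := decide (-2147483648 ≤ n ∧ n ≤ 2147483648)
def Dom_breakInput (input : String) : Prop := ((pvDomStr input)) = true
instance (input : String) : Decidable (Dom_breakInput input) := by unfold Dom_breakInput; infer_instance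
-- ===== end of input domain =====

-- B replaces A's manual character-accumulation loop by one split('\n') plus a [:-1] slice (simpler).


-- ===== PORT A =====
-- chars is accumulated as a List Char (Python's growing string), turned into a String when emitted
def breakInput (input : String) : List String :=
  let st := input.toList.foldl
    (fun (s : List Char × List String) char =>
      if char = '\n' then ([], s.2 ++ [String.ofList s.1]) else (s.1 ++ [char], s.2))
    ([], [])
  st.2.filter (fun s => PySem.Str.strip s ≠ "")

-- ===== PORT B =====
-- input.split('\n') with a nonempty separator: PySem.Str.split? returns some; getD [] unwraps it
def breakInput_alt (input : String) : List String :=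
  let parts := (PySem.Str.split? input "\n").getD []
  (PySem.List.slice parts none (some (-1))).filter (fun s => PySem.Str.strip s ≠ "")

-- ===== PRECONDITION & SPEC =====
def Spec_breakInput (input : String) (out : List String) : Prop := out = breakInput_alt input
instance (input : String) (out : List String) : Decidable (Spec_breakInput input out) := by unfold Spec_breakInput; infer_instance

-- ===== CLAIM (what is proved, stated in full; the proofs are below) =====
def Claim_equal_breakInput : Prop := ∀ (input : String), Dom_breakInput input → Spec_breakInput input (breakInput input)

-- ===== LEMMAS AND PROOFS =====

/-- Reference segmentation: split `cur ++ l` at newlines, `cur` the pending segment. -/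
def pvSeg : List Char → List Char → List (List Char)
  | [], cur => [cur]
  | c :: l, cur => if c = '\n' then cur :: pvSeg l [] else pvSeg l (cur ++ [c])

theorem pvSeg_ne_nil (l cur : List Char) : pvSeg l cur ≠ [] := by
  induction l generalizing cur with
  | nil => simp [pvSeg]
  | cons c l ih => simp only [pvSeg]; split <;> simp [ih]

theorem splitOn_go_eq (fuel : Nat) (l cur : List Char) (arest : List (List Char))
    (h : l.length < fuel) :
    PySem.Chars.splitOn.go ['\n'] fuel l cur arest = arest.reverse ++ pvSeg l cur.reverse := by
  induction fuel generalizing l cur arest with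
  | zero => omega
  | succ f ih =>
    cases l with
    | nil => simp [PySem.Chars.splitOn.go, pvSeg]
    | cons c rest =>
      by_cases hc : c = '\n'
      · subst hc
        have : (['\n'].isPrefixOf ('\n' :: rest)) = true := by simp [List.isPrefixOf]
        simp only [PySem.Chars.splitOn.go, this, if_pos]
        show PySem.Chars.splitOn.go ['\n'] f rest [] (cur.reverse :: arest) = _
        rw [ih rest [] (cur.reverse :: arest) (by simpa using Nat.lt_of_succ_lt_succ h)]
        simp [pvSeg]
      · have : (['\n'].isPrefixOf (c :: rest)) = false := by
          have : ('\n' == c) = false := by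
            simp only [beq_eq_false_iff_ne, ne_eq]
            exact fun h => hc h.symm
          simp [List.isPrefixOf, this]
        simp only [PySem.Chars.splitOn.go, this, if_neg, Bool.false_eq_true, not_false_iff]
        rw [ih rest (c :: cur) arest (by simpa using Nat.lt_of_succ_lt_succ h)]
        simp [pvSeg, hc]

theorem splitOn_eq_pvSeg (s : List Char) :
    PySem.Chars.splitOn s ['\n'] = pvSeg s [] := by
  unfold PySem.Chars.splitOn
  simpa using splitOn_go_eq (s.length + 1) s [] [] (Nat.lt_succ_self _)

theorem foldl_eq_pvSeg (l cs : List Char) (acc : List String) :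
    (l.foldl
      (fun (s : List Char × List String) char =>
        if char = '\n' then ([], s.2 ++ [String.ofList s.1]) else (s.1 ++ [char], s.2))
      (cs, acc)).2 = acc ++ ((pvSeg l cs).map String.ofList).dropLast := by
  induction l generalizing cs acc with
  | nil => simp [pvSeg]
  | cons c l ih =>
    by_cases hc : c = '\n'
    · subst hc
      simp only [List.foldl_cons, pvSeg, ite_true]
      rw [ih]
      have hne : (pvSeg l []).map String.ofList ≠ [] := by
        simp [pvSeg_ne_nil]
      simp only [List.map_cons, List.dropLast_cons_of_ne_nil hne, List.append_assoc,
        List.singleton_append]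
    · simp only [List.foldl_cons, pvSeg, if_neg hc]
      exact ih (cs ++ [c]) acc

-- ===== VERDICT (by name: the statement is the Claim_ definition above) =====
theorem breakInput_spec : Claim_equal_breakInput := by
  intro input _
  unfold Spec_breakInput breakInput breakInput_alt
  simp only [PySem.Str.split?]
  have hsep : ("\n" : String).toList = ['\n'] := rfl
  rw [hsep]
  simp only [PySem.Chars.split?, List.isEmpty]
  rw [PySem.List.slice_to_neg_one, splitOn_eq_pvSeg, foldl_eq_pvSeg]
  simp
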